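-- pv_equiv track=rewrite | github.com/TimothySjiang/leetcodepy | coolFeature.py | coolFeature
-- ===== SOURCE A (Python) =====
-- import collections
--
-- def coolFeature(a,b,queries):
--     counter = collections.Counter(a)
--     res = []
--     for query in queries:
--         if len(query) == 2:
--             res.append(findSum(counter,b,query[1]))
--         else:
--             b[query[1]] = query[2]
--     return res
--
-- def findSum(map,b,target):
--     res = 0
--     for num in b:
--         res += map[target-num]
--     return res
-- ===== SOURCE B (Python) =====
-- import collections
--
-- def coolFeature(a, b, queries):
--     # Maintains a Counter of b's current values so each sum query loops over
--     # distinct values (weighted) instead of every element of b.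
--     # Like A, mutates the caller's list b in place on update queries.
--     counter = collections.Counter(a)
--     bcount = collections.Counter(b)
--     res = []
--     for query in queries:
--         if len(query) == 2:
--             target = query[1]
--             res.append(sum(cnt * counter[target - v] for v, cnt in bcount.items()))
--         else:
--             i, val = query[1], query[2]
--             bcount[b[i]] -= 1
--             b[i] = val
--             bcount[val] += 1
--     return res
-- ===== Notes on version B (the rewrite author's own statement) =====
-- stated objective: alternative
-- what changed: B answers each sum query by iterating a maintained Counter of b's distinct values (weighting each by its multiplicity), updating that Counter incrementally on assignment queries, instead of A's helper re-scanning all of b for every query.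
import Mathlib
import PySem

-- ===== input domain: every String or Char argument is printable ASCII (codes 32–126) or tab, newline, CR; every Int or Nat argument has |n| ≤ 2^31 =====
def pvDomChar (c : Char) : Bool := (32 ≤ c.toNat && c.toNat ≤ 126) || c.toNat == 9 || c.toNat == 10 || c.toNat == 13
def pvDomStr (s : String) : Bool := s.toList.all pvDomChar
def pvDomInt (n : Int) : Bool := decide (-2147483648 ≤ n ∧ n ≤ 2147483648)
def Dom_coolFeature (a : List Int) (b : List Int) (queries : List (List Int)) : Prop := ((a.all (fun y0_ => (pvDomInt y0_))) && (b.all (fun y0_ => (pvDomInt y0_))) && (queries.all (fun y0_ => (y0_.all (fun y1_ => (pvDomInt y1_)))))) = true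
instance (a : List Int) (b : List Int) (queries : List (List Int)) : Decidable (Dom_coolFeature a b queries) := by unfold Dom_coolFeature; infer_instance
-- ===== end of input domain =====

-- B replaces A's full rescan of b per sum query by a maintained Counter of b's
-- distinct values (alternative decomposition); both A and B mutate the caller's
-- list b in place on update queries — the equivalence proved here is about the
-- return value (B performs the same mutation).

-- ===== PORT A =====
def pvFindSum (map : PySem.Dict Int Int) (b : List Int) (target : Int) : Int :=
  b.foldl (fun res num => res + map.getD (target - num) 0) 0

def coolFeature (a : List Int) (b : List Int) (queries : List (List Int)) : List Int :=
  let counter := PySem.Dict.counter a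
  (queries.foldl (fun (st : List Int × List Int) query =>
      if query.length = 2 then
        (st.1, st.2 ++ [pvFindSum counter st.1 (PySem.List.pyGetD query 1 0)])
      else
        (PySem.List.pySetD st.1 (PySem.List.pyGetD query 1 0) (PySem.List.pyGetD query 2 0), st.2))
    (b, [])).2

-- ===== PORT B =====
def coolFeature_alt (a : List Int) (b : List Int) (queries : List (List Int)) : List Int :=
  let counter := PySem.Dict.counter a
  (queries.foldl (fun (st : List Int × PySem.Dict Int Int × List Int) query =>
      if query.length = 2 then
        let target := PySem.List.pyGetD query 1 0
        (st.1, st.2.1,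
          st.2.2 ++ [st.2.1.items.foldl (fun s p => s + p.2 * (PySem.Dict.getD counter (target - p.1) 0)) 0])
      else
        let i := PySem.List.pyGetD query 1 0
        let val := PySem.List.pyGetD query 2 0
        let bc := (st.2.1.modify (PySem.List.pyGetD st.1 i 0) 0 (· - 1)).modify val 0 (· + 1)
        (PySem.List.pySetD st.1 i val, bc, st.2.2))
    (b, PySem.Dict.counter b, [])).2.2

-- ===== PRECONDITION & SPEC =====
-- Pre_ excludes exactly the inputs where A raises IndexError: a query of length < 2,
-- or an update query (length ≠ 2, so it needs indices 1 and 2) whose index query[1]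
-- is out of range for b (b's length is constant through the loop).
def Pre_coolFeature (a : List Int) (b : List Int) (queries : List (List Int)) : Prop :=
  ∀ q ∈ queries, q.length = 2 ∨
    (3 ≤ q.length ∧ PySem.Raise.InRange b.length (PySem.List.pyGetD q 1 0))
instance (a : List Int) (b : List Int) (queries : List (List Int)) : Decidable (Pre_coolFeature a b queries) := by unfold Pre_coolFeature; infer_instance

def pvWitness_coolFeature : List Int × List Int × List (List Int) :=
  ([1, 2], [3, 1], [[1, 3], [0, 0, 2], [1, 4]])

def Spec_coolFeature (a : List Int) (b : List Int) (queries : List (List Int)) (out : List Int) : Prop := out = coolFeature_alt a b queries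
instance (a : List Int) (b : List Int) (queries : List (List Int)) (out : List Int) : Decidable (Spec_coolFeature a b queries out) := by unfold Spec_coolFeature; infer_instance

-- ===== CLAIM (what is proved, stated in full; the proofs are below) =====
def Claim_equal_coolFeature : Prop := ∀ (a : List Int) (b : List Int) (queries : List (List Int)), Dom_coolFeature a b queries → Pre_coolFeature a b queries → Spec_coolFeature a b queries (coolFeature a b queries)

-- ===== LEMMAS AND PROOFS =====

-- Invariant: bc is a correct multiplicity table for the current list bl.
def pvInv (bl : List Int) (bc : PySem.Dict Int Int) : Prop :=
  bc.keys.Nodup ∧ (∀ w : Int, bc.getD w 0 = (bl.count w : Int)) ∧ (∀ x ∈ bl, x ∈ bc.keys)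

lemma pv_sum_weight (f : Int → Int) : ∀ (keys l : List Int), keys.Nodup → (∀ x ∈ l, x ∈ keys) →
    (keys.map (fun k => (l.count k : Int) * f k)).sum = (l.map f).sum := by
  intro keys
  induction keys with
  | nil =>
    intro l _ hsub
    have : l = [] := by
      cases l with
      | nil => rfl
      | cons x xs => exact absurd (hsub x (by simp)) (by simp)
    simp [this]
  | cons k ks ih =>
    intro l hnd hsub
    have hnd' : ks.Nodup := hnd.of_cons
    have hk : k ∉ ks := by simp [List.nodup_cons] at hnd; exact hnd.1
    set l2 := l.filter (fun x => !(x == k)) with hl2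
    have hperm : List.Perm (l.filter (fun x => x == k) ++ l2) l := List.filter_append_perm _ l
    have hsplit : (l.map f).sum =
        ((l.filter (fun x => x == k)).map f).sum + (l2.map f).sum := by
      rw [← List.sum_append, ← List.map_append]
      exact (((hperm).map f).sum_eq).symm
    have hconst : ((l.filter (fun x => x == k)).map f).sum = (l.count k : Int) * f k := by
      have hall : ∀ y ∈ (l.filter (fun x => x == k)).map f, y = f k := by
        intro y hy
        simp only [List.mem_map, List.mem_filter, beq_iff_eq] at hy
        obtain ⟨x, ⟨_, rfl⟩, rfl⟩ := hy
        rfl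
      rw [List.sum_eq_card_nsmul _ _ hall]
      simp [List.count_eq_length_filter, mul_comm]
    have hcount : ∀ k' ∈ ks, (l2.count k' : Int) = (l.count k' : Int) := by
      intro k' hk'
      have : k' ≠ k := fun h => hk (h ▸ hk')
      rw [hl2, List.count_filter (by simp [this])]
    have hsub2 : ∀ x ∈ l2, x ∈ ks := by
      intro x hx
      rw [hl2, List.mem_filter] at hx
      have hmem := hsub x hx.1
      simp at hx
      rcases List.mem_cons.mp hmem with h | h
      · exact absurd h hx.2
      · exact h
    calc ((k :: ks).map (fun k => (l.count k : Int) * f k)).sum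
        = (l.count k : Int) * f k + (ks.map (fun k => (l.count k : Int) * f k)).sum := by simp
      _ = (l.count k : Int) * f k + (ks.map (fun k => (l2.count k : Int) * f k)).sum := by
          rw [List.map_congr_left (fun x hx => by rw [← hcount x hx])]
      _ = (l.count k : Int) * f k + (l2.map f).sum := by rw [ih l2 hnd' hsub2]
      _ = (l.map f).sum := by rw [hsplit, hconst]

lemma pv_idx_norm (l : List Int) (i v d : Int) (h : PySem.Raise.InRange l.length i) :
    ∃ (n : Nat) (hn' : n < l.length), PySem.List.pyGetD l i d = l[n]'hn' ∧
      PySem.List.pySetD l i v = l.set n v := by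
  rcases h with ⟨hlo, hhi⟩
  by_cases hi : 0 ≤ i
  · have hn : i.toNat < l.length := by omega
    have hidx : PySem.List.pyIdx? l.length i = some i.toNat := by
      simp [PySem.List.pyIdx?, hi, hhi]
    exact ⟨i.toNat, hn, by
      simp [PySem.List.pyGetD, PySem.List.pyGet?, hidx, List.getElem?_eq_getElem hn], by
      simp [PySem.List.pySetD, PySem.List.pySet?, hidx]⟩
  · have hn : l.length - (-i).toNat < l.length := by omega
    have hidx : PySem.List.pyIdx? l.length i = some (l.length - (-i).toNat) := by
      simp [PySem.List.pyIdx?, hi, hlo]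
    exact ⟨l.length - (-i).toNat, hn, by
      simp [PySem.List.pyGetD, PySem.List.pyGet?, hidx, List.getElem?_eq_getElem hn], by
      simp [PySem.List.pySetD, PySem.List.pySet?, hidx]⟩

lemma pv_count_set_int (l : List Int) (n : Nat) (hn : n < l.length) (v w : Int) :
    (((l.set n v).count w : Int)) =
      (l.count w : Int) - (if l[n] = w then 1 else 0) + (if v = w then 1 else 0) := by
  have hset : l.set n v = l.take n ++ v :: l.drop (n + 1) := by
    rw [List.set_eq_take_append_cons_drop, if_pos hn]
  have hl : l = l.take n ++ l[n] :: l.drop (n + 1) := by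
    conv_lhs => rw [← List.take_append_drop n l]
    rw [List.drop_eq_getElem_cons hn]
  have hcnt : l.count w = (l.take n).count w + ((if w = l[n] then 1 else 0) + (l.drop (n + 1)).count w) := by
    nth_rewrite 1 [hl]
    rw [List.count_append, List.count_cons]
    simp only [beq_iff_eq]
    by_cases h : w = l[n]
    · simp [h]; omega
    · simp [h]
      exact fun hh => h hh.symm
  rw [hset]
  simp only [List.count_append, List.count_cons, beq_iff_eq]
  rw [hcnt]
  push_cast
  split_ifs <;> omega

lemma pv_nodup_keys_modify (d : PySem.Dict Int Int) (k : Int) (g : Int → Int)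
    (h : d.keys.Nodup) : (d.modify k 0 g).keys.Nodup := by
  have := PySem.Dict.nodup_keys_foldl_modify_key [k] (fun x => x) 0 (fun _ _ => g) d h
  simpa using this

lemma pv_mem_keys_modify_self (d : PySem.Dict Int Int) (k : Int) (g : Int → Int) :
    k ∈ (d.modify k 0 g).keys := by
  rw [PySem.Dict.keys_modify]
  exact (PySem.Dict.mem_keys_insert ..).mpr (Or.inl rfl)

lemma pv_mem_keys_modify_of_mem (d : PySem.Dict Int Int) (k x : Int) (g : Int → Int)
    (h : x ∈ d.keys) : x ∈ (d.modify k 0 g).keys := by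
  rw [PySem.Dict.keys_modify]
  exact (PySem.Dict.mem_keys_insert ..).mpr (Or.inr h)

lemma pv_inv_update (bl : List Int) (bc : PySem.Dict Int Int) (i v : Int)
    (h : PySem.Raise.InRange bl.length i) (hinv : pvInv bl bc) :
    pvInv (PySem.List.pySetD bl i v)
      ((bc.modify (PySem.List.pyGetD bl i 0) 0 (· - 1)).modify v 0 (· + 1)) := by
  obtain ⟨n, hn, hget, hsetl⟩ := pv_idx_norm bl i v 0 h
  obtain ⟨hnd, hcnt, hmem⟩ := hinv
  refine ⟨?_, ?_, ?_⟩
  · exact pv_nodup_keys_modify _ v _ (pv_nodup_keys_modify bc _ _ hnd)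
  · intro w
    rw [hsetl, pv_count_set_int bl n hn v w, hget]
    simp only [PySem.Dict.getD_modify, hcnt]
    split_ifs <;> subst_vars <;> omega
  · intro x hx
    rw [hsetl] at hx
    rcases List.mem_or_eq_of_mem_set hx with hx' | rfl
    · exact pv_mem_keys_modify_of_mem _ v x _ (pv_mem_keys_modify_of_mem _ _ x _ (hmem x hx'))
    · exact pv_mem_keys_modify_self _ x _

lemma pv_query_sum (counter : PySem.Dict Int Int) (bl : List Int) (bc : PySem.Dict Int Int)
    (t : Int) (hinv : pvInv bl bc) :
    bc.items.foldl (fun s p => s + p.2 * (PySem.Dict.getD counter (t - p.1) 0)) 0 =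
      pvFindSum counter bl t := by
  obtain ⟨hnd, hcnt, hmem⟩ := hinv
  rw [pvFindSum, PySem.List.foldl_add, PySem.List.foldl_add, zero_add, zero_add,
      PySem.Dict.items_eq_map_keys bc hnd 0, List.map_map]
  have h1 : (fun p : Int × Int => p.2 * PySem.Dict.getD counter (t - p.1) 0) ∘
      (fun k => (k, bc.getD k 0)) = fun k : Int =>
        (bl.count k : Int) * PySem.Dict.getD counter (t - k) 0 := by
    funext k
    simp [hcnt k]
  rw [h1]
  exact pv_sum_weight (fun num => PySem.Dict.getD counter (t - num) 0) bc.keys bl hnd hmem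

lemma pv_loop_eq (counter : PySem.Dict Int Int) :
    ∀ (queries : List (List Int)) (bl : List Int) (bc : PySem.Dict Int Int) (res : List Int),
    (∀ q ∈ queries, q.length = 2 ∨
      (3 ≤ q.length ∧ PySem.Raise.InRange bl.length (PySem.List.pyGetD q 1 0))) →
    pvInv bl bc →
    (queries.foldl (fun (st : List Int × List Int) query =>
        if query.length = 2 then
          (st.1, st.2 ++ [pvFindSum counter st.1 (PySem.List.pyGetD query 1 0)])
        else
          (PySem.List.pySetD st.1 (PySem.List.pyGetD query 1 0) (PySem.List.pyGetD query 2 0), st.2))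
      (bl, res)).2 =
    (queries.foldl (fun (st : List Int × PySem.Dict Int Int × List Int) query =>
        if query.length = 2 then
          let target := PySem.List.pyGetD query 1 0
          (st.1, st.2.1,
            st.2.2 ++ [st.2.1.items.foldl (fun s p => s + p.2 * (PySem.Dict.getD counter (target - p.1) 0)) 0])
        else
          let i := PySem.List.pyGetD query 1 0
          let val := PySem.List.pyGetD query 2 0
          let bc' := (st.2.1.modify (PySem.List.pyGetD st.1 i 0) 0 (· - 1)).modify val 0 (· + 1)
          (PySem.List.pySetD st.1 i val, bc', st.2.2))
      (bl, bc, res)).2.2 := by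
  intro queries
  induction queries with
  | nil => intro bl bc res _ _; rfl
  | cons q qs ih =>
    intro bl bc res hpre hinv
    by_cases hq : q.length = 2
    · simp only [List.foldl_cons, if_pos hq]
      rw [pv_query_sum counter bl bc (PySem.List.pyGetD q 1 0) hinv]
      exact ih bl bc _ (fun q' hq' => hpre q' (List.mem_cons_of_mem q hq')) hinv
    · have hr := hpre q (List.mem_cons_self ..)
      rcases hr with h2 | ⟨_, hir⟩
      · exact absurd h2 hq
      simp only [List.foldl_cons, if_neg hq]
      have hlen : (PySem.List.pySetD bl (PySem.List.pyGetD q 1 0) (PySem.List.pyGetD q 2 0)).length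
          = bl.length := PySem.List.length_pySetD ..
      exact ih _ _ _
        (fun q' hq' => by rw [hlen]; exact hpre q' (List.mem_cons_of_mem q hq'))
        (pv_inv_update bl bc _ _ hir hinv)

-- ===== VERDICT (by name: the statement is the Claim_ definition above) =====
theorem coolFeature_spec : Claim_equal_coolFeature := by
  intro a b queries _hdom hpre
  unfold Spec_coolFeature coolFeature coolFeature_alt
  exact pv_loop_eq (PySem.Dict.counter a) queries b (PySem.Dict.counter b) [] hpre
    ⟨PySem.Dict.nodup_keys_counter b,
     fun w => PySem.Dict.getD_counter b w,
     fun x hx => by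
       rw [PySem.Dict.keys_counter]
       exact (PySem.Set.mem_ofList _ _).mpr hx⟩
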